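-- pv_equiv track=rewrite | github.com/happyAnger6/notes | 科目考试/20210122/p1.py | employee
-- ===== SOURCE A (Python) =====
-- from collections import defaultdict
--
-- def employee(nums, scores, preference):
--     people_num = len(scores)
--     people_flag = [0 for _ in range(people_num)]
--     departs = 0
--
--     depart_selects = defaultdict(list)
--     for i, pre in enumerate(preference):
--         for p in pre:
--             depart_selects[p].append((i, scores[i]))
--
--     for i, num in enumerate(nums):
--         left = num
--         if left == 0:
--             departs += 1
--             continue
--
--         for p in sorted(depart_selects[i], key=lambda x: (-x[1], x[0])):
--             no, score = p
--             if people_flag[no] == 1: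
--                 continue
--
--             people_flag[no] = 1
--             left -= 1
--             if left == 0:
--                 departs += 1
--                 break
--
--     no_people = 0
--     for p in people_flag:
--         if p == 0:
--             no_people += 1
--
--     return [departs, no_people]
-- ===== SOURCE B (Python) =====
-- def employee(nums, scores, preference):
--     assigned = set()
--     departs = 0
--     for i, num in enumerate(nums):
--         if num == 0:
--             departs += 1
--             continue
--         order = sorted({p for p, prefs in enumerate(preference) if i in prefs},
--                        key=lambda p: (-scores[p], p))
--         fresh = [p for p in order if p not in assigned]
--         if 0 < num <= len(fresh):
--             departs += 1
--             fresh = fresh[:num]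
--         assigned.update(fresh)
--     return [departs, len(scores) - len(assigned)]
-- ===== Notes on version B (the rewrite author's own statement) =====
-- stated objective: alternative
-- what changed: B drops A's inverted defaultdict of (person,score) pairs and the 0/1 flag array with its per-candidate break loop: per department it builds a sorted set-comprehension of candidate persons, filters out already-assigned people into a 'fresh' list, slices that list to the quota and counts the department filled by a length comparison; unassigned people are counted arithmetically as len(scores)-len(assigned).
import Mathlib
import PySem

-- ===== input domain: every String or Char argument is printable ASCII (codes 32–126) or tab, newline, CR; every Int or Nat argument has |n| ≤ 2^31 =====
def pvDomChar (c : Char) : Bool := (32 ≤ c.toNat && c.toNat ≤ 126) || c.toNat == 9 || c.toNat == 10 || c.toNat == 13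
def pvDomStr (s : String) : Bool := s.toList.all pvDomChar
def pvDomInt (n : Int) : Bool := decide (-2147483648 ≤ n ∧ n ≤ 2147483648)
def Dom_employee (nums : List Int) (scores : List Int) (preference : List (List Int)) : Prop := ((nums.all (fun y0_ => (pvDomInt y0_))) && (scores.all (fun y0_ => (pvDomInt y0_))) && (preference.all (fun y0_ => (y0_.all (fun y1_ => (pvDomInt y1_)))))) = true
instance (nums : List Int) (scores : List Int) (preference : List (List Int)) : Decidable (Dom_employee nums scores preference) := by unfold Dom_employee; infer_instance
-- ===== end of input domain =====

-- B replaces A's index-and-flag machinery (inverted defaultdict of (person,score) pairs, 0/1 flag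
-- array, per-candidate break loop) by a per-department set comprehension of candidate persons,
-- a filtered "fresh" list that is sliced to the department's quota, and an arithmetic count of
-- unassigned people; objective: alternative decomposition, same results.

-- ===== PORT A =====
-- the defaultdict build: depart_selects[p].append((i, scores[i]))
def pvBuildA (scores : List Int) (preference : List (List Int)) : PySem.Dict Int (List (Int × Int)) :=
  (PySem.List.enumerate preference).foldl
    (fun d ip => ip.2.foldl
      (fun d p => d.modify p [] (· ++ [(ip.1, PySem.List.pyGetD scores ip.1 0)])) d)
    PySem.Dict.empty

-- the inner 'for p in sorted(...)' loop with its break, state (people_flag, departs)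
def pvInnerA (cands : List (Int × Int)) (flag : List Int) (left departs : Int) : List Int × Int :=
  match cands with
  | [] => (flag, departs)
  | c :: rest =>
    if PySem.List.pyGetD flag c.1 0 == 1 then pvInnerA rest flag left departs
    else if left - 1 == 0 then (PySem.List.pySetD flag c.1 1, departs + 1)
    else pvInnerA rest (PySem.List.pySetD flag c.1 1) (left - 1) departs

def employee (nums : List Int) (scores : List Int) (preference : List (List Int)) : List Int :=
  let people_flag := (PySem.List.pyRange 0 (scores.length : Int) 1).map (fun _ => (0 : Int))
  let depart_selects := pvBuildA scores preference
  let res := (PySem.List.enumerate nums).foldl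
    (fun st inum =>
      if inum.2 == 0 then (st.1, st.2 + 1)
      else pvInnerA
        (PySem.List.sorted2 (depart_selects.getD inum.1 []) (fun x => -x.2) (fun x => x.1))
        st.1 inum.2 st.2)
    (people_flag, (0 : Int))
  let no_people := res.1.foldl (fun acc p => if p == 0 then acc + 1 else acc) (0 : Int)
  [res.2, no_people]

-- ===== PORT B =====
-- sorted({p for p, prefs in enumerate(preference) if i in prefs}, key=lambda p: (-scores[p], p))
def pvOrderB (scores : List Int) (preference : List (List Int)) (i : Int) : List Int :=
  PySem.List.sorted2
    (PySem.Set.ofList ((PySem.List.enumerate preference).filterMap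
      (fun pp => if pp.2.contains i then some pp.1 else none)))
    (fun p => -(PySem.List.pyGetD scores p 0)) (fun p => p)

def employee_alt (nums : List Int) (scores : List Int) (preference : List (List Int)) : List Int :=
  let res := (PySem.List.enumerate nums).foldl
    (fun st inum =>
      if inum.2 == 0 then (st.1, st.2 + 1)
      else
        let fresh := (pvOrderB scores preference inum.1).filter
          (fun p => !(PySem.Set.contains st.1 p))
        -- 'fresh[:num]' is taken only under 0 < num, where slicing is List.take
        if 0 < inum.2 ∧ inum.2 ≤ (fresh.length : Int) then
          (PySem.Set.update st.1 (fresh.take inum.2.toNat), st.2 + 1)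
        else (PySem.Set.update st.1 fresh, st.2))
    ((PySem.Set.empty : PySem.Set Int), (0 : Int))
  [res.2, (scores.length : Int) - PySem.Set.len res.1]

-- ===== PRECONDITION & SPEC =====
-- Pre_ excludes exactly the inputs where A raises IndexError: scores[k] is read for every
-- person k whose preference list is non-empty, so each such k must be < len(scores).
def Pre_employee (nums : List Int) (scores : List Int) (preference : List (List Int)) : Prop :=
  ∀ pp ∈ PySem.List.enumerate preference, pp.2 ≠ [] → pp.1 < (scores.length : Int)
instance (nums : List Int) (scores : List Int) (preference : List (List Int)) : Decidable (Pre_employee nums scores preference) := by unfold Pre_employee; infer_instance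

def pvWitness_employee : List Int × List Int × List (List Int) :=
  ([1, 2], [5, 3, 7], [[0], [0, 1], [1]])

def Spec_employee (nums : List Int) (scores : List Int) (preference : List (List Int)) (out : List Int) : Prop := out = employee_alt nums scores preference
instance (nums : List Int) (scores : List Int) (preference : List (List Int)) (out : List Int) : Decidable (Spec_employee nums scores preference out) := by unfold Spec_employee; infer_instance

-- ===== CLAIM (what is proved, stated in full; the proofs are below) =====
def Claim_equal_employee : Prop := ∀ (nums : List Int) (scores : List Int) (preference : List (List Int)), Dom_employee nums scores preference → Pre_employee nums scores preference → Spec_employee nums scores preference (employee nums scores preference)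

-- ===== LEMMAS AND PROOFS =====

-- the 0/1 people_flag list determined by the list of assigned people
def pvMask (n : Nat) (s : List Int) : List Int :=
  (PySem.List.pyRange 0 (n : Int) 1).map (fun j => if j ∈ s then 1 else 0)

-- A's per-department candidate pair list, as a flatMap
def pvPairs (scores : List Int) (preference : List (List Int)) (i : Int) : List (Int × Int) :=
  (PySem.List.enumerate preference).flatMap
    (fun pp => pp.2.filterMap (fun d => if d == i then some (pp.1, PySem.List.pyGetD scores pp.1 0) else none))

-- B's candidate person list before dedup/sort
def pvPersons (preference : List (List Int)) (i : Int) : List Int :=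
  (PySem.List.enumerate preference).filterMap (fun pp => if pp.2.contains i then some pp.1 else none)

-- ordered first-occurrence dedup
def pvODedup : List Int → List Int
  | [] => []
  | p :: r => p :: (pvODedup r).filter (fun q => q != p)

-- the people newly assignable from l given already-assigned s, in order, dups removed
def pvFreshP : List Int → List Int → List Int
  | [], _ => []
  | p :: r, s => if p ∈ s then pvFreshP r s else p :: pvFreshP r (s ++ [p])

-- the lexicographic sort key (-score, person)
def pvKey (scores : List Int) (p : Int) : Lex (Int × Int) :=
  toLex (-(PySem.List.pyGetD scores p 0), p)

lemma pvMask_length (n : Nat) (s : List Int) : (pvMask n s).length = n := by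
  simp [pvMask, PySem.List.pyRange_zero_natCast]

lemma pvMask_get (n : Nat) (s : List Int) (p : Int) (h0 : 0 ≤ p) (h1 : p < (n : Int)) :
    PySem.List.pyGetD (pvMask n s) p 0 = if p ∈ s then 1 else 0 :=
  PySem.List.pyGetD_map_pyRange_of_nonneg _ _ _ _ h0 h1

lemma pvMask_getElem (n : Nat) (s : List Int) (j : Nat) (hj : j < n) :
    (pvMask n s)[j]'(by rw [pvMask_length]; exact hj) = if (j : Int) ∈ s then 1 else 0 := by
  have h := pvMask_get n s (j : Int) (by omega) (by omega)
  rw [PySem.List.pyGetD_eq_getElem _ _ (by omega)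
    (by rw [pvMask_length]; omega)] at h
  simpa using h

lemma pvMask_set (n : Nat) (s : List Int) (p : Int) (h0 : 0 ≤ p) (h1 : p < (n : Int)) :
    PySem.List.pySetD (pvMask n s) p 1 = pvMask n (s ++ [p]) := by
  rw [PySem.List.pySetD_of_nonneg _ _ h0]
  apply List.ext_getElem
  · simp [pvMask_length]
  · intro j hj hj'
    have hjn : j < n := by rw [List.length_set, pvMask_length] at hj; exact hj
    rw [List.getElem_set, pvMask_getElem n (s ++ [p]) j hjn]
    by_cases hjp : p.toNat = j
    · have hje : (j : Int) = p := by omega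
      simp [hjp, hje]
    · rw [if_neg hjp, pvMask_getElem n s j hjn]
      have hne : (j : Int) ≠ p := by omega
      simp [List.mem_append, hne]

-- counting the zeros of a mask
lemma pvMask_count (n : Nat) (s : List Int) (hs : ∀ x ∈ s, 0 ≤ x ∧ x < (n : Int))
    (hnd : s.Nodup) :
    (pvMask n s).foldl (fun acc p => if p == 0 then acc + 1 else acc) 0
      = (n : Int) - (s.length : Int) := by
  rw [PySem.List.foldl_beq_add_one]
  have hperm : ((List.range n).filter (fun j : Nat => decide ((j : Int) ∈ s))).Perm
      (s.map Int.toNat) := by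
    rw [List.perm_ext_iff_of_nodup (List.Nodup.filter _ List.nodup_range)
      ((List.nodup_map_iff_inj_on hnd).mpr (fun x hx y hy hxy => by
        have := (hs x hx).1; have := (hs y hy).1; omega))]
    intro a
    simp only [List.mem_filter, List.mem_range, List.mem_map, decide_eq_true_eq]
    constructor
    · rintro ⟨ha, hm⟩; exact ⟨(a : Int), hm, by omega⟩
    · rintro ⟨x, hx, rfl⟩
      refine ⟨?_, ?_⟩
      · have := hs x hx; omega
      · have hx0 : ((x.toNat : Nat) : Int) = x := by have := (hs x hx).1; omega
        rw [hx0]; exact hx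
  have hmemcnt : (List.range n).countP (fun j : Nat => decide ((j : Int) ∈ s)) = s.length := by
    rw [List.countP_eq_length_filter, hperm.length_eq, List.length_map]
  have hcnt : (pvMask n s).count 0 = n - s.length := by
    rw [List.count_eq_countP]
    unfold pvMask
    rw [PySem.List.pyRange_zero_natCast, List.map_map, List.countP_map]
    have hpred : ((fun (x : Int) => x == 0) ∘ ((fun j : Int => if j ∈ s then (1 : Int) else 0) ∘ (fun k : Nat => (k : Int))))
        = (fun j : Nat => !decide ((j : Int) ∈ s)) := by
      funext j
      by_cases hj : (j : Int) ∈ s <;> simp [hj]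
    rw [hpred]
    have hsplit := List.length_eq_countP_add_countP (l := List.range n)
      (fun j : Nat => decide ((j : Int) ∈ s))
    have hnot : (List.range n).countP (fun j : Nat => !decide ((j : Int) ∈ s))
        = (List.range n).countP (fun a : Nat => decide ¬(decide ((a : Int) ∈ s) = true)) := by
      apply List.countP_congr
      intro a _
      by_cases ha : (a : Int) ∈ s <;> simp [ha]
    rw [hnot]
    simp only [List.length_range] at hsplit
    omega
  have hle : s.length ≤ n := by
    have h1 := hperm.length_eq
    rw [List.length_map] at h1
    have h2 := List.length_filter_le (fun j : Nat => decide ((j : Int) ∈ s)) (List.range n)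
    rw [List.length_range] at h2
    omega
  rw [hcnt]
  omega

-- per-person map+filter equals the filterMap of pvPairs
lemma pvFiltermap_eq (pre : List Int) (i : Int) (v : Int × Int) :
    ((pre.map (fun p => (p, v))).filter (fun q => q.1 == i)).map (fun x => x.2)
    = pre.filterMap (fun d => if d == i then some v else none) := by
  induction pre with
  | nil => rfl
  | cons h t ih =>
    simp only [List.map_cons, List.filter_cons, List.filterMap_cons]
    by_cases hi : (h == i) = true
    · simp [hi, ih]
    · simp [hi, ih]

-- the dict built by A, read per department
lemma pvCand_eq (scores : List Int) (preference : List (List Int)) (i : Int) :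
    (pvBuildA scores preference).getD i [] = pvPairs scores preference i := by
  unfold pvBuildA pvPairs
  have hstep : (fun (d : PySem.Dict Int (List (Int × Int))) (ip : Int × List Int) =>
        ip.2.foldl (fun d p => d.modify p [] (· ++ [(ip.1, PySem.List.pyGetD scores ip.1 0)])) d)
      = (fun d ip =>
        (ip.2.map (fun p => (p, (ip.1, PySem.List.pyGetD scores ip.1 0)))).foldl
          (fun d q => d.modify q.1 [] (· ++ [q.2])) d) := by
    funext d ip; rw [List.foldl_map]
  rw [hstep, ← List.foldl_flatMap, PySem.Dict.getD_foldl_modify_append,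
    List.filter_flatMap, List.map_flatMap]
  simp only [PySem.Dict.getD_empty, List.nil_append]
  congr 1
  funext pp
  exact pvFiltermap_eq pp.2 i (pp.1, PySem.List.pyGetD scores pp.1 0)

-- membership of pvPairs, with the shape of its elements
lemma pvPairs_mem_spec (scores : List Int) (preference : List (List Int)) (i : Int)
    (c : Int × Int) (hc : c ∈ pvPairs scores preference i) :
    ∃ pp ∈ PySem.List.enumerate preference, i ∈ pp.2 ∧ c = (pp.1, PySem.List.pyGetD scores pp.1 0) := by
  simp only [pvPairs, List.mem_flatMap, List.mem_filterMap] at hc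
  obtain ⟨pp, hpp, d, hd, hdc⟩ := hc
  split_ifs at hdc with hdi
  exact ⟨pp, hpp, (eq_of_beq hdi) ▸ hd, (Option.some.inj hdc).symm⟩

lemma pvPersons_mem (preference : List (List Int)) (i : Int) (x : Int) :
    x ∈ pvPersons preference i
      ↔ ∃ pp ∈ PySem.List.enumerate preference, i ∈ pp.2 ∧ x = pp.1 := by
  simp only [pvPersons, List.mem_filterMap]
  constructor
  · rintro ⟨pp, hpp, hx⟩
    split_ifs at hx with hci
    exact ⟨pp, hpp, List.contains_iff_mem.mp hci, (Option.some.inj hx).symm⟩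
  · rintro ⟨pp, hpp, hmem, rfl⟩
    exact ⟨pp, hpp, by simp [hmem]⟩

lemma pvPersons_nodup (preference : List (List Int)) (i : Int) :
    (pvPersons preference i).Nodup := by
  have h := PySem.List.pairwise_lt_enumerate preference 0
  have h2 : (pvPersons preference i).Pairwise (· < ·) := by
    unfold pvPersons
    refine List.Pairwise.filterMap _ ?_ h
    intro a a' hlt b hb b' hb'
    split_ifs at hb hb'
    rw [← Option.some.inj hb, ← Option.some.inj hb']
    exact hlt
  exact h2.imp (fun h => ne_of_lt h)

lemma pvPersons_bound (scores : List Int) (preference : List (List Int)) (i : Int)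
    (hpre : ∀ pp ∈ PySem.List.enumerate preference, pp.2 ≠ [] → pp.1 < (scores.length : Int)) :
    ∀ x ∈ pvPersons preference i, 0 ≤ x ∧ x < (scores.length : Int) := by
  intro x hx
  obtain ⟨pp, hpp, hmem, rfl⟩ := (pvPersons_mem preference i x).mp hx
  have hne : pp.2 ≠ [] := by
    intro h; rw [h] at hmem; simp at hmem
  refine ⟨?_, hpre pp hpp hne⟩
  obtain ⟨k, hk, rfl⟩ := (PySem.List.mem_enumerate_iff _ _ _).mp hpp
  simp

-- pvODedup: sublist, membership, nodup
lemma pvODedup_sublist (l : List Int) : (pvODedup l).Sublist l := by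
  induction l with
  | nil => simp [pvODedup]
  | cons p r ih =>
    exact List.Sublist.cons₂ p (List.filter_sublist.trans ih)

lemma pvODedup_mem (l : List Int) (x : Int) : x ∈ pvODedup l ↔ x ∈ l := by
  induction l with
  | nil => simp [pvODedup]
  | cons p r ih =>
    simp only [pvODedup, List.mem_cons, List.mem_filter, ih, bne_iff_ne]
    constructor
    · rintro (rfl | ⟨h, _⟩)
      · exact Or.inl rfl
      · exact Or.inr h
    · rintro (rfl | h)
      · exact Or.inl rfl
      · by_cases hx : x = p
        · exact Or.inl hx
        · exact Or.inr ⟨h, by simpa using hx⟩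

lemma pvODedup_nodup (l : List Int) : (pvODedup l).Nodup := by
  induction l with
  | nil => simp [pvODedup]
  | cons p r ih =>
    refine List.Nodup.cons ?_ (ih.filter _)
    intro hmem
    have := (List.mem_filter.mp hmem).2
    simp at this

-- pvFreshP is ordered dedup then removing the already-assigned
lemma pvFreshP_eq (l : List Int) (s : List Int) :
    pvFreshP l s = (pvODedup l).filter (fun q => !(PySem.Set.contains s q)) := by
  induction l generalizing s with
  | nil => rfl
  | cons p r ih =>
    have hded : pvODedup (p :: r) = p :: (pvODedup r).filter (fun q => q != p) := rfl
    by_cases hp : p ∈ s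
    · have hc : PySem.Set.contains s p = true := (PySem.Set.contains_iff s p).mpr hp
      simp only [pvFreshP]
      rw [if_pos hp, ih, hded, List.filter_cons, hc]
      rw [if_neg (by decide), List.filter_filter]
      refine List.filter_congr ?_
      intro x hx
      by_cases hxp : x = p
      · subst hxp; simp [hc, hp]
      · have hbne : (x != p) = true := by simp [hxp]
        simp [hbne]
    · have hc : PySem.Set.contains s p = false := by
        rw [← Bool.not_eq_true, PySem.Set.contains_iff]; exact hp
      simp only [pvFreshP]
      rw [if_neg hp, ih, hded, List.filter_cons, hc]
      rw [if_pos (by decide), List.filter_filter]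
      congr 1
      refine List.filter_congr ?_
      intro x hx
      by_cases hxp : x = p
      · subst hxp
        have h1 : PySem.Set.contains (s ++ [x]) x = true :=
          (PySem.Set.contains_iff _ _).mpr (List.mem_append_right _ (List.mem_singleton_self x))
        have hbne : (x != x) = false := by simp
        simp [h1, hbne]
      · have hbne : (x != p) = true := by simp [hxp]
        by_cases hxs : x ∈ s
        · have h1 : PySem.Set.contains (s ++ [p]) x = true :=
            (PySem.Set.contains_iff _ _).mpr (List.mem_append_left _ hxs)
          have h2 : PySem.Set.contains s x = true := (PySem.Set.contains_iff s x).mpr hxs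
          simp [h1, h2, hbne, hxp]
        · have h1 : PySem.Set.contains (s ++ [p]) x = false := by
            rw [← Bool.not_eq_true, PySem.Set.contains_iff]
            simp [hxs, hxp]
          have h2 : PySem.Set.contains s x = false := by
            rw [← Bool.not_eq_true, PySem.Set.contains_iff]; exact hxs
          simp [h1, h2, hbne, hxp]

-- sorted2 over Int keys is sorted with the lexicographic key
lemma pvSorted2_lex {α : Type} (xs : List α) (k1 k2 : α → Int) :
    PySem.List.sorted2 xs k1 k2
      = PySem.List.sorted xs (fun x => toLex (k1 x, k2 x)) := by
  rw [PySem.List.sorted_eq_foldl_insertBy]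
  show xs.foldl (fun acc x => PySem.List.insertBy
      (fun a b => decide (k1 a < k1 b) || (!decide (k1 b < k1 a) && decide (k2 a < k2 b))) x acc) []
    = _
  congr 1
  funext acc x
  congr 1
  funext a b
  have hiff : (k1 a < k1 b ∨ (¬(k1 b < k1 a) ∧ k2 a < k2 b))
      ↔ (toLex (k1 a, k2 a) < toLex (k1 b, k2 b)) := by
    rw [Prod.Lex.toLex_lt_toLex]
    dsimp only
    constructor
    · rintro (h | ⟨h1, h2⟩)
      · exact Or.inl h
      · by_cases h3 : k1 a < k1 b
        · exact Or.inl h3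
        · exact Or.inr ⟨le_antisymm (not_lt.mp h1) (not_lt.mp h3), h2⟩
    · rintro (h | ⟨he, h2⟩)
      · exact Or.inl h
      · exact Or.inr ⟨by rw [he]; exact lt_irrefl _, h2⟩
  simp only [← decide_not, ← Bool.decide_and, ← Bool.decide_or]
  exact decide_eq_decide.mpr hiff

lemma pvKey_inj (scores : List Int) (p q : Int) (h : pvKey scores p = pvKey scores q) : p = q := by
  unfold pvKey at h
  have := congrArg (fun x => (ofLex x).2) h
  simpa using this

-- the dedup of A's sorted pair list (by person) IS B's sorted person list
lemma pvOrder_eq (scores : List Int) (preference : List (List Int)) (i : Int) :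
    pvODedup ((PySem.List.sorted2 (pvPairs scores preference i)
        (fun x => -x.2) (fun x => x.1)).map Prod.fst)
      = pvOrderB scores preference i := by
  have hsortA : PySem.List.sorted2 (pvPairs scores preference i) (fun x => -x.2) (fun x => x.1)
      = PySem.List.sorted (pvPairs scores preference i) (fun x => toLex (-x.2, x.1)) :=
    pvSorted2_lex _ _ _
  have horderB : pvOrderB scores preference i
      = PySem.List.sorted (pvPersons preference i) (fun p => pvKey scores p) := by
    unfold pvOrderB
    rw [show (PySem.Set.ofList ((PySem.List.enumerate preference).filterMap
        (fun pp => if pp.2.contains i then some pp.1 else none)))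
      = PySem.Set.ofList (pvPersons preference i) from rfl]
    rw [PySem.Set.ofList_eq_self_of_nodup _ (pvPersons_nodup preference i), pvSorted2_lex]
    rfl
  rw [horderB]
  refine (PySem.List.sorted_eq_of_perm_of_pairwise_lt _ _ _ ?_ ?_).symm
  · -- permutation: both are nodup with the same members
    rw [List.perm_ext_iff_of_nodup (pvODedup_nodup _) (pvPersons_nodup preference i)]
    intro x
    rw [pvODedup_mem, pvPersons_mem]
    constructor
    · intro hx
      obtain ⟨c, hc, rfl⟩ := List.mem_map.mp hx
      have hc2 := (PySem.List.sorted2_perm _ _ _ _).mem_iff.mp hc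
      obtain ⟨pp, hpp, hmem, rfl⟩ := pvPairs_mem_spec scores preference i c hc2
      exact ⟨pp, hpp, hmem, rfl⟩
    · rintro ⟨pp, hpp, hmem, rfl⟩
      refine List.mem_map.mpr ⟨(pp.1, PySem.List.pyGetD scores pp.1 0), ?_, rfl⟩
      refine (PySem.List.sorted2_perm _ _ _ _).mem_iff.mpr ?_
      simp only [pvPairs, List.mem_flatMap]
      exact ⟨pp, hpp, List.mem_filterMap.mpr ⟨i, hmem, by simp⟩⟩
  · -- strict pairwise in the key
    have hp1 : (PySem.List.sorted2 (pvPairs scores preference i)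
        (fun x => -x.2) (fun x => x.1)).Pairwise
        (fun a b => (toLex (-a.2, a.1) : Lex (Int × Int)) ≤ toLex (-b.2, b.1)) := by
      rw [hsortA]
      exact PySem.List.sorted_pairwise _ _
    have hp2 : (PySem.List.sorted2 (pvPairs scores preference i)
        (fun x => -x.2) (fun x => x.1)).Pairwise
        (fun a b => pvKey scores a.1 ≤ pvKey scores b.1) := by
      refine hp1.imp_of_mem ?_
      intro a b ha hb hab
      have ha2 := (PySem.List.sorted2_perm _ _ _ _).mem_iff.mp ha
      have hb2 := (PySem.List.sorted2_perm _ _ _ _).mem_iff.mp hb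
      obtain ⟨pa, _, _, rfl⟩ := pvPairs_mem_spec scores preference i a ha2
      obtain ⟨pb, _, _, rfl⟩ := pvPairs_mem_spec scores preference i b hb2
      exact hab
    have hp3 : ((PySem.List.sorted2 (pvPairs scores preference i)
        (fun x => -x.2) (fun x => x.1)).map Prod.fst).Pairwise
        (fun p q => pvKey scores p ≤ pvKey scores q) := List.pairwise_map.mpr hp2
    have hp4 := List.Pairwise.sublist (pvODedup_sublist _) hp3
    have hnd := pvODedup_nodup ((PySem.List.sorted2 (pvPairs scores preference i)
        (fun x => -x.2) (fun x => x.1)).map Prod.fst)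
    exact (hp4.and hnd).imp
      (fun h => lt_of_le_of_ne h.1 (fun he => h.2 (pvKey_inj scores _ _ he)))

-- characterisation of A's inner loop: assign the fresh people, stop at the quota
lemma pvInnerA_nil (flag : List Int) (left d : Int) : pvInnerA [] flag left d = (flag, d) := rfl

lemma pvInnerA_cons (c : Int × Int) (rest : List (Int × Int)) (flag : List Int) (left d : Int) :
    pvInnerA (c :: rest) flag left d =
      if PySem.List.pyGetD flag c.1 0 == 1 then pvInnerA rest flag left d
      else if left - 1 == 0 then (PySem.List.pySetD flag c.1 1, d + 1)
      else pvInnerA rest (PySem.List.pySetD flag c.1 1) (left - 1) d := rfl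

lemma pvInnerA_eq (n : Nat) (cands : List (Int × Int)) (s : List Int) (left d : Int)
    (hc : ∀ c ∈ cands, 0 ≤ c.1 ∧ c.1 < (n : Int)) :
    pvInnerA cands (pvMask n s) left d =
      (if 0 < left ∧ left ≤ ((pvFreshP (cands.map Prod.fst) s).length : Int)
       then (pvMask n (s ++ (pvFreshP (cands.map Prod.fst) s).take left.toNat), d + 1)
       else (pvMask n (s ++ pvFreshP (cands.map Prod.fst) s), d)) := by
  induction cands generalizing s left with
  | nil =>
    rw [pvInnerA_nil]
    rw [if_neg (by
      simp only [List.map_nil, pvFreshP, List.length_nil, Nat.cast_zero]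
      omega)]
    simp [pvFreshP]
  | cons c rest ih =>
    obtain ⟨h0, h1⟩ := hc c (List.mem_cons_self ..)
    have hrest := fun c' hc' => hc c' (List.mem_cons_of_mem _ hc')
    simp only [List.map_cons, pvFreshP]
    by_cases hp : c.1 ∈ s
    · have hflag : (PySem.List.pyGetD (pvMask n s) c.1 0 == 1) = true := by
        rw [pvMask_get n s c.1 h0 h1, if_pos hp]
        decide
      rw [pvInnerA_cons, if_pos hflag, if_pos hp]
      exact ih s left hrest
    · have hflag : (PySem.List.pyGetD (pvMask n s) c.1 0 == 1) = false := by
        rw [pvMask_get n s c.1 h0 h1, if_neg hp]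
        decide
      rw [pvInnerA_cons, if_neg (by simp [hflag]), if_neg hp]
      by_cases hl1 : left = 1
      · subst hl1
        rw [if_pos (by decide), pvMask_set n s c.1 h0 h1,
          if_pos ⟨by norm_num, by simp only [List.length_cons]; push_cast; omega⟩]
        simp
      · rw [if_neg (by simp only [beq_iff_eq]; omega)]
        rw [pvMask_set n s c.1 h0 h1, ih (s ++ [c.1]) (left - 1) hrest]
        by_cases hcnd : 0 < left - 1
            ∧ left - 1 ≤ ((pvFreshP (rest.map Prod.fst) (s ++ [c.1])).length : Int)
        · rw [if_pos hcnd,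
            if_pos (by simp only [List.length_cons]; push_cast at hcnd ⊢; omega)]
          have htk : left.toNat = (left - 1).toNat + 1 := by omega
          rw [htk, List.take_succ_cons]
          simp [List.append_assoc]
        · rw [if_neg hcnd]
          rw [if_neg (by simp only [List.length_cons]; push_cast at hcnd ⊢; omega)]
          simp [List.append_assoc]

-- bounds for pvOrderB's members
lemma pvOrderB_bound (scores : List Int) (preference : List (List Int)) (i : Int)
    (hpre : ∀ pp ∈ PySem.List.enumerate preference, pp.2 ≠ [] → pp.1 < (scores.length : Int)) :
    ∀ x ∈ pvOrderB scores preference i, 0 ≤ x ∧ x < (scores.length : Int) := by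
  intro x hx
  unfold pvOrderB at hx
  have hx2 := (PySem.List.sorted2_perm _ _ _ _).mem_iff.mp hx
  have hx3 : x ∈ PySem.Set.ofList (pvPersons preference i) := hx2
  rw [PySem.Set.ofList_eq_self_of_nodup _ (pvPersons_nodup preference i)] at hx3
  exact pvPersons_bound scores preference i hpre x hx3

lemma pvOrderB_nodup (scores : List Int) (preference : List (List Int)) (i : Int) :
    (pvOrderB scores preference i).Nodup := by
  unfold pvOrderB
  rw [(PySem.List.sorted2_perm _ _ _ _).nodup_iff]
  exact PySem.Set.nodup_ofList _

-- updating a set with fresh distinct elements appends them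
lemma pvUpdate_append (s xs : List Int) (hnd : xs.Nodup) (hdis : ∀ x ∈ xs, x ∉ s) :
    PySem.Set.update s xs = s ++ xs := by
  rw [PySem.Set.update_eq_append_filter, PySem.Set.ofList_eq_self_of_nodup _ hnd]
  congr 1
  apply List.filter_eq_self.mpr
  intro x hx
  simpa using hdis x hx

-- pvPairs bounds under the precondition
lemma pvPairsSorted_bound (scores : List Int) (preference : List (List Int)) (i : Int)
    (hpre : ∀ pp ∈ PySem.List.enumerate preference, pp.2 ≠ [] → pp.1 < (scores.length : Int)) :
    ∀ c ∈ PySem.List.sorted2 (pvPairs scores preference i) (fun x => -x.2) (fun x => x.1),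
      0 ≤ c.1 ∧ c.1 < (scores.length : Int) := by
  intro c hc
  have hc2 := (PySem.List.sorted2_perm _ _ _ _).mem_iff.mp hc
  obtain ⟨pp, hpp, hmem, rfl⟩ := pvPairs_mem_spec scores preference i c hc2
  have hne : pp.2 ≠ [] := by
    intro h; rw [h] at hmem; simp at hmem
  refine ⟨?_, hpre pp hpp hne⟩
  obtain ⟨k, hk, rfl⟩ := (PySem.List.mem_enumerate_iff _ _ _).mp hpp
  simp

-- bisimulation of the two outer department loops
lemma pvOuter (scores : List Int) (preference : List (List Int))
    (hpre : ∀ pp ∈ PySem.List.enumerate preference, pp.2 ≠ [] → pp.1 < (scores.length : Int))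
    (l : List (Int × Int)) (s : List Int) (d : Int)
    (hs : ∀ x ∈ s, 0 ≤ x ∧ x < (scores.length : Int)) (hnd : s.Nodup) :
    (l.foldl
      (fun st inum =>
        if inum.2 == 0 then (st.1, st.2 + 1)
        else pvInnerA
          (PySem.List.sorted2 ((pvBuildA scores preference).getD inum.1 []) (fun x => -x.2) (fun x => x.1))
          st.1 inum.2 st.2)
      (pvMask scores.length s, d)
      = (pvMask scores.length
          ((l.foldl
            (fun st inum =>
              if inum.2 == 0 then (st.1, st.2 + 1)
              else
                let fresh := (pvOrderB scores preference inum.1).filter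
                  (fun p => !(PySem.Set.contains st.1 p))
                if 0 < inum.2 ∧ inum.2 ≤ (fresh.length : Int) then
                  (PySem.Set.update st.1 (fresh.take inum.2.toNat), st.2 + 1)
                else (PySem.Set.update st.1 fresh, st.2))
            (s, d)).1),
        (l.foldl
            (fun st inum =>
              if inum.2 == 0 then (st.1, st.2 + 1)
              else
                let fresh := (pvOrderB scores preference inum.1).filter
                  (fun p => !(PySem.Set.contains st.1 p))
                if 0 < inum.2 ∧ inum.2 ≤ (fresh.length : Int) then
                  (PySem.Set.update st.1 (fresh.take inum.2.toNat), st.2 + 1)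
                else (PySem.Set.update st.1 fresh, st.2))
            (s, d)).2))
    ∧ (∀ x ∈ (l.foldl
            (fun st inum =>
              if inum.2 == 0 then (st.1, st.2 + 1)
              else
                let fresh := (pvOrderB scores preference inum.1).filter
                  (fun p => !(PySem.Set.contains st.1 p))
                if 0 < inum.2 ∧ inum.2 ≤ (fresh.length : Int) then
                  (PySem.Set.update st.1 (fresh.take inum.2.toNat), st.2 + 1)
                else (PySem.Set.update st.1 fresh, st.2))
            (s, d)).1, 0 ≤ x ∧ x < (scores.length : Int))
    ∧ (l.foldl
            (fun st inum =>
              if inum.2 == 0 then (st.1, st.2 + 1)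
              else
                let fresh := (pvOrderB scores preference inum.1).filter
                  (fun p => !(PySem.Set.contains st.1 p))
                if 0 < inum.2 ∧ inum.2 ≤ (fresh.length : Int) then
                  (PySem.Set.update st.1 (fresh.take inum.2.toNat), st.2 + 1)
                else (PySem.Set.update st.1 fresh, st.2))
            (s, d)).1.Nodup := by
  induction l generalizing s d with
  | nil => exact ⟨rfl, hs, hnd⟩
  | cons inum t ih =>
    simp only [List.foldl_cons]
    by_cases h0 : (inum.2 == 0) = true
    · simp only [h0, if_true]
      exact ih s (d + 1) hs hnd
    · simp only [h0, Bool.false_eq_true, if_neg, not_false_iff]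
      rw [pvCand_eq,
        pvInnerA_eq scores.length _ s inum.2 d (pvPairsSorted_bound scores preference inum.1 hpre),
        pvFreshP_eq, pvOrder_eq]
      have hfrnd : ((pvOrderB scores preference inum.1).filter
          (fun q => !(PySem.Set.contains s q))).Nodup :=
        (pvOrderB_nodup scores preference inum.1).filter _
      have hfrdis : ∀ x ∈ (pvOrderB scores preference inum.1).filter
          (fun q => !(PySem.Set.contains s q)), x ∉ s := by
        intro x hx
        have hcb := (List.mem_filter.mp hx).2
        rw [Bool.not_eq_true'] at hcb
        intro hm
        rw [(PySem.Set.contains_iff s x).mpr hm] at hcb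
        exact absurd hcb (by decide)
      have hfrb : ∀ x ∈ (pvOrderB scores preference inum.1).filter
          (fun q => !(PySem.Set.contains s q)), 0 ≤ x ∧ x < (scores.length : Int) :=
        fun x hx => pvOrderB_bound scores preference inum.1 hpre x (List.mem_filter.mp hx).1
      by_cases hcnd : 0 < inum.2 ∧ inum.2 ≤ (((pvOrderB scores preference inum.1).filter
          (fun q => !(PySem.Set.contains s q))).length : Int)
      · rw [if_pos hcnd, if_pos hcnd,
          pvUpdate_append s _ (hfrnd.sublist (List.take_sublist _ _))
            (fun x hx => hfrdis x (List.mem_of_mem_take hx))]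
        apply ih
        · intro x hx
          rcases List.mem_append.mp hx with h | h
          · exact hs x h
          · exact hfrb x (List.mem_of_mem_take h)
        · exact List.Nodup.append hnd (hfrnd.sublist (List.take_sublist _ _))
            (fun a ha hb => hfrdis a (List.mem_of_mem_take hb) ha)
      · rw [if_neg hcnd, if_neg hcnd, pvUpdate_append s _ hfrnd hfrdis]
        apply ih
        · intro x hx
          rcases List.mem_append.mp hx with h | h
          · exact hs x h
          · exact hfrb x h
        · exact List.Nodup.append hnd hfrnd (fun a ha hb => hfrdis a hb ha)

-- ===== VERDICT (by name: the statement is the Claim_ definition above) =====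
theorem employee_spec : Claim_equal_employee := by
  unfold Claim_equal_employee
  intro nums scores preference _ hpre
  unfold Pre_employee at hpre
  unfold Spec_employee employee employee_alt
  dsimp only
  have hmask0 : (PySem.List.pyRange 0 (scores.length : Int) 1).map (fun _ => (0 : Int))
      = pvMask scores.length [] := by
    simp [pvMask, PySem.List.pyRange_zero_natCast, List.map_map]
  have hempty : (PySem.Set.empty : PySem.Set Int) = [] := rfl
  rw [hmask0, hempty]
  obtain ⟨heq, hb, hnd⟩ := pvOuter scores preference hpre (PySem.List.enumerate nums) [] 0
    (by intro x hx; cases hx) List.nodup_nil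
  rw [heq, pvMask_count scores.length _ hb hnd]
  simp [PySem.Set.len]
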